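-- pv_equiv track=rewrite | github.com/raeez/chiral-bar-cobar | compute/lib/bc_iwasawa_deep_engine.py | teichmuller_lift
-- ===== SOURCE A (Python) =====
-- def teichmuller_lift(a: int, p: int, precision: int = 40) -> int:
--     r"""Teichmuller representative omega(a) mod p^precision.
--
--     The unique (p-1)-th root of unity in Z_p reducing to a mod p.
--     Computed by Hensel lifting: x -> x^p converges to the Teichmuller lift.
--     """
--     if p == 2:
--         return 1  # (Z/2Z)^* = {1}
--     a = a % p
--     if a == 0:
--         return 0
--     modulus = p ** precision
--     x = a
--     for _ in range(precision + 10):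
--         x = pow(x, p, modulus)
--     return x
-- ===== SOURCE B (Python) =====
-- def teichmuller_lift(a: int, p: int, precision: int = 40) -> int:
--     """Teichmuller representative omega(a) mod p^precision.
--
--     Instead of a loop of precision+10 separate modular p-th powerings,
--     fold the whole chain into one exponent e = p**(precision+10) and run a
--     single left-to-right binary square-and-multiply over e's bits.
--     """
--     if p == 2:
--         return 1
--     a %= p
--     if a == 0:
--         return 0
--     m = p ** precision
--     e = p ** (precision + 10)
--     r = 1 % m
--     for bit in bin(e)[2:]:
--         r = r * r % m
--         if bit == '1':
--             r = r * a % m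
--     return r
-- ===== Notes on version B (the rewrite author's own statement) =====
-- stated objective: alternative
-- what changed: B collapses A's Python-level loop of precision+10 successive modular p-th powerings into a single hand-written left-to-right binary square-and-multiply with the closed-form exponent p**(precision+10).
-- outside the precondition, e.g. on teichmuller_lift(3, 5, -12): A returns 3, B raises TypeError; on teichmuller_lift(2, -5, 3): A returns -57, B returns -68
import Mathlib
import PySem

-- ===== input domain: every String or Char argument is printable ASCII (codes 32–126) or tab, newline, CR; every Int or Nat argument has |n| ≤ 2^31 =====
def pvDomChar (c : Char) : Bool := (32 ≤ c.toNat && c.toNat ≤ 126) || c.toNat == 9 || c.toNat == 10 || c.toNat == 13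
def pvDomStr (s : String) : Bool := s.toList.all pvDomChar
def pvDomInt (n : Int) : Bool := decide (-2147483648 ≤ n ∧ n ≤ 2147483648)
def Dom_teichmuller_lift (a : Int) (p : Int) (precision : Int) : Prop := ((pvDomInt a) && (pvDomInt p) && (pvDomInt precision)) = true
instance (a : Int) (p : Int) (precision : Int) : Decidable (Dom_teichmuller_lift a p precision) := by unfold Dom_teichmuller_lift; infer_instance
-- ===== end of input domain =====

-- B folds A's loop of precision+10 modular p-th powerings into one left-to-right binary
-- square-and-multiply with the closed-form exponent p**(precision+10) (objective: alternative).

-- ===== PORT A =====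
def teichmuller_lift (a : Int) (p : Int) (precision : Int) : Int :=
  if p = 2 then 1
  else
    let a' := PySem.Int.mod a p
    if a' = 0 then 0
    else
      let modulus := p ^ precision.toNat  -- p ** precision (Pre_ gives 0 ≤ precision here)
      (PySem.List.pyRange 0 (precision + 10)).foldl
        (fun x _ => PySem.Int.powMod x p.toNat modulus) a'  -- pow(x, p, modulus); Pre_ gives 1 ≤ p

-- ===== PORT B =====
-- bin(e)[2:] as a most-significant-bit-first list, built tail-recursively; exact for e ≥ 1
-- (the only case reached under Pre_: there p ≥ 3, so e = p^(precision+10) ≥ 1 and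
-- bin(e)[2:] has no leading zeros).
def msbBits (e : Nat) (acc : List Bool) : List Bool :=
  if h : e = 0 then acc else msbBits (e / 2) ((e % 2 == 1) :: acc)
decreasing_by exact Nat.div_lt_self (Nat.pos_of_ne_zero h) (by omega)

def teichmuller_lift_alt (a : Int) (p : Int) (precision : Int) : Int :=
  if p = 2 then 1
  else
    let a' := PySem.Int.mod a p
    if a' = 0 then 0
    else
      let m := p ^ precision.toNat
      let e := p ^ (precision + 10).toNat
      (msbBits e.toNat []).foldl
        (fun r bit =>
          let r2 := PySem.Int.mod (r * r) m
          if bit then PySem.Int.mod (r2 * a') m else r2)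
        (PySem.Int.mod 1 m)

-- ===== PRECONDITION & SPEC =====
-- Pre_ excludes inputs on which A raises (p = 0; a float modulus from negative precision),
-- and the regions p ≤ -1 and (p ≥ 3, precision ≤ -10) outside the p-adic domain, where A's
-- returned value rests on negative-exponent modular inverses resp. on an accidentally empty
-- loop beside a float modulus; B naturally raises or differs there.
def Pre_teichmuller_lift (a : Int) (p : Int) (precision : Int) : Prop :=
  p = 2 ∨ (p ≠ 0 ∧ PySem.Int.mod a p = 0) ∨ (1 ≤ p ∧ 0 ≤ precision)
instance (a : Int) (p : Int) (precision : Int) : Decidable (Pre_teichmuller_lift a p precision) := by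
  unfold Pre_teichmuller_lift; infer_instance

def pvWitness_teichmuller_lift : Int × Int × Int := (2, 5, 3)

def Spec_teichmuller_lift (a : Int) (p : Int) (precision : Int) (out : Int) : Prop :=
  out = teichmuller_lift_alt a p precision
instance (a : Int) (p : Int) (precision : Int) (out : Int) : Decidable (Spec_teichmuller_lift a p precision out) := by
  unfold Spec_teichmuller_lift; infer_instance

-- ===== CLAIM (what is proved, stated in full; the proofs are below) =====
def Claim_equal_teichmuller_lift : Prop := ∀ (a : Int) (p : Int) (precision : Int), Dom_teichmuller_lift a p precision → Pre_teichmuller_lift a p precision → Spec_teichmuller_lift a p precision (teichmuller_lift a p precision)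

-- ===== LEMMAS AND PROOFS =====

lemma msbBits_append (k : Nat) : ∀ acc : List Bool, msbBits k acc = msbBits k [] ++ acc := by
  induction k using Nat.strong_induction_on with
  | _ k ih =>
    intro acc
    by_cases h0 : k = 0
    · simp [h0, msbBits]
    · have hlt : k / 2 < k := Nat.div_lt_self (Nat.pos_of_ne_zero h0) (by omega)
      have l : msbBits k acc = msbBits (k / 2) ((k % 2 == 1) :: acc) := by
        rw [msbBits]; simp [h0]
      have r : msbBits k [] = msbBits (k / 2) [(k % 2 == 1)] := by
        rw [msbBits]; simp [h0]
      rw [l, r, ih _ hlt, ih _ hlt ([(k % 2 == 1)]), List.append_assoc]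
      rfl

-- Iterating x ↦ pow(x, pn, m) over range (n+1) is one exponentiation with exponent pn^(n+1).
lemma foldl_powMod_range (pn : Nat) (m : Int) (hm : 0 < m) (n : Nat) (x : Int) :
    (List.range (n + 1)).foldl (fun y _ => PySem.Int.powMod y pn m) x
      = PySem.Int.mod (x ^ pn ^ (n + 1)) m := by
  induction n with
  | zero => simp [List.range_succ, PySem.Int.powMod_eq]
  | succ k ih =>
      rw [List.range_succ, List.foldl_append, ih]
      simp only [List.foldl_cons, List.foldl_nil, PySem.Int.powMod_eq,
        PySem.Int.mod_eq_emod_of_pos hm]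
      rw [Int.ModEq.pow pn (Int.emod_emod_of_dvd _ dvd_rfl), ← pow_mul, ← pow_succ]

-- B's MSB-first square-and-multiply over the bits of k computes b ^ k mod m.
lemma foldl_bits (b m : Int) (hm : 0 < m) : ∀ k : Nat,
    (msbBits k []).foldl
      (fun r bit =>
        let r2 := PySem.Int.mod (r * r) m
        if bit then PySem.Int.mod (r2 * b) m else r2)
      (PySem.Int.mod 1 m) = PySem.Int.mod (b ^ k) m := by
  intro k
  induction k using Nat.strong_induction_on with
  | _ k ih =>
    rw [msbBits]
    by_cases h0 : k = 0
    · simp [h0]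
    · have hlt : k / 2 < k := Nat.div_lt_self (Nat.pos_of_ne_zero h0) (by omega)
      rw [dif_neg h0, msbBits_append, List.foldl_append, ih _ hlt]
      simp only [List.foldl_cons, List.foldl_nil]
      simp only [PySem.Int.mod_eq_emod_of_pos hm]
      have hsq : b ^ (k / 2) % m * (b ^ (k / 2) % m) % m = b ^ (2 * (k / 2)) % m := by
        rw [two_mul, pow_add]
        exact Int.ModEq.mul (Int.emod_emod_of_dvd _ dvd_rfl)
          (Int.emod_emod_of_dvd _ dvd_rfl)
      by_cases hpar : k % 2 = 1
      · simp only [hpar, beq_self_eq_true, if_true, hsq]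
        calc b ^ (2 * (k / 2)) % m * b % m
            = b ^ (2 * (k / 2)) * b % m :=
              Int.ModEq.mul_right _ (Int.emod_emod_of_dvd _ dvd_rfl)
          _ = b ^ k % m := by rw [← pow_succ, show 2 * (k / 2) + 1 = k by omega]
      · have h2 : (k % 2 == 1) = false := by
          simp only [beq_eq_false_iff_ne]; omega
        simp only [h2, hsq, show 2 * (k / 2) = k by omega]
        simp

-- ===== VERDICT (by name: the statement is the Claim_ definition above) =====
theorem teichmuller_lift_spec : Claim_equal_teichmuller_lift := by
  intro a p precision _ hpre
  unfold Spec_teichmuller_lift teichmuller_lift teichmuller_lift_alt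
  by_cases h2 : p = 2
  · simp [h2]
  · simp only [h2, if_false]
    by_cases h0 : PySem.Int.mod a p = 0
    · simp [h0]
    · simp only [h0, if_false]
      have hp : 1 ≤ p := by
        rcases hpre with h | ⟨_, hm⟩ | ⟨hp, _⟩
        · exact absurd h h2
        · exact absurd hm h0
        · exact hp
      have hprec : 0 ≤ precision := by
        rcases hpre with h | ⟨_, hm⟩ | ⟨_, hprec⟩
        · exact absurd h h2
        · exact absurd hm h0
        · exact hprec
      have hm : (0 : Int) < p ^ precision.toNat := pow_pos (by omega) _
      have hb : precision + 10 = ((precision.toNat + 9 + 1 : Nat) : Int) := by push_cast; omega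
      rw [hb, PySem.List.pyRange_zero_natCast, List.foldl_map,
        foldl_powMod_range _ _ hm, foldl_bits _ _ hm]
      have he : (p ^ (((precision.toNat + 9 + 1 : Nat) : Int)).toNat).toNat
          = p.toNat ^ (precision.toNat + 9 + 1) := by
        have hp' : p = ((p.toNat : Nat) : Int) := by omega
        rw [Int.toNat_natCast, hp', ← Int.natCast_pow, Int.toNat_natCast, Int.toNat_natCast]
      rw [he]
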